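-- pv_equiv track=rewrite | github.com/Cocoagoat/Nyanpasutats-backend | malstats/main/modules/MAL_utils.py | replace_characters_for_url
-- ===== SOURCE A (Python) =====
-- def replace_characters_for_url(s):
--     """This function replaces characters in the titles of the shows as they are
--     returned by the MAL API,
--     according to the way they're supposed to be written in the URL. There doesn't
--     seem to be any consistency -
--     some characters like "-" are retained as they are, while others are omitted or
--     replaced with an underscore.
--     Seriously, exclamation marks are omitted while question marks sometimes
--     are...and sometimes aren't."""
--
--     replace_with_empty = [",", "(", ")", "'", ".", "!", "\"", "?", "[", "]", "{", "}",
--                           "$", "#", "@", "%", "^", "*"]  #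
--     replace_with_underscore = [" ", ":", "&", ";", "/", "+"]
--     for ch in replace_with_empty:
--         s = s.replace(ch, "")
--     for ch in replace_with_underscore:
--         s = s.replace(ch, "_")
--     return s
-- ===== SOURCE B (Python) =====
-- _REMOVE = frozenset([",", "(", ")", "'", ".", "!", "\"", "?", "[", "]", "{", "}",
--                      "$", "#", "@", "%", "^", "*"])
-- _UNDERSCORE = frozenset([" ", ":", "&", ";", "/", "+"])
--
--
-- def replace_characters_for_url(s):
--     return "".join("" if ch in _REMOVE else "_" if ch in _UNDERSCORE else ch
--                    for ch in s)
-- ===== Notes on version B (the rewrite author's own statement) =====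
-- stated objective: alternative
-- what changed: A rescans the whole string 24 times, once per str.replace; B classifies each character once against two precomputed frozensets and joins the pieces in a single pass (fewer scans asymptotically in the alphabet size, but CPython's C-level str.replace makes A faster in practice).
import Mathlib
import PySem

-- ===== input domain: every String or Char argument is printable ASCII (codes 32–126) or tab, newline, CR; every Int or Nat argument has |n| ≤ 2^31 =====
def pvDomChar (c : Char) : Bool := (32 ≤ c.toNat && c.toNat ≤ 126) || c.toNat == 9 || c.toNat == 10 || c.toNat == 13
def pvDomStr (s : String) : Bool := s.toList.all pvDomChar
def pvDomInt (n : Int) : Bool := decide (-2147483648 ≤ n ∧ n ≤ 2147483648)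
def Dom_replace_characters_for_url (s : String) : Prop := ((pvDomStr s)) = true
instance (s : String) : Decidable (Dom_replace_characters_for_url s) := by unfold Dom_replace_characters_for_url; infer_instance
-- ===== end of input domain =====

-- B replaces A's 24 whole-string str.replace scans by a single pass that classifies each
-- character against two fixed character sets (alternative single-scan algorithm; same mapping).


-- ===== PORT A =====
def replace_characters_for_url (s : String) : String :=
  let replace_with_empty : List String :=
    [",", "(", ")", "'", ".", "!", "\"", "?", "[", "]", "{", "}",
     "$", "#", "@", "%", "^", "*"]
  let replace_with_underscore : List String := [" ", ":", "&", ";", "/", "+"]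
  let s1 := replace_with_empty.foldl (fun s ch => PySem.Str.replace s ch "") s
  replace_with_underscore.foldl (fun s ch => PySem.Str.replace s ch "_") s1

-- ===== PORT B =====
def removeChars : List Char :=
  [',', '(', ')', '\'', '.', '!', '"', '?', '[', ']', '{', '}',
   '$', '#', '@', '%', '^', '*']

def underscoreChars : List Char := [' ', ':', '&', ';', '/', '+']

def replace_characters_for_url_alt (s : String) : String :=
  String.ofList (PySem.Chars.join []
    (s.toList.map (fun c =>
      if c ∈ removeChars then [] else if c ∈ underscoreChars then ['_'] else [c])))

-- ===== PRECONDITION & SPEC =====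
def Spec_replace_characters_for_url (s : String) (out : String) : Prop := out = replace_characters_for_url_alt s
instance (s : String) (out : String) : Decidable (Spec_replace_characters_for_url s out) := by unfold Spec_replace_characters_for_url; infer_instance

-- ===== CLAIM (what is proved, stated in full; the proofs are below) =====
def Claim_equal_replace_characters_for_url : Prop := ∀ (s : String), Dom_replace_characters_for_url s → Spec_replace_characters_for_url s (replace_characters_for_url s)

-- ===== LEMMAS AND PROOFS =====

-- Single-character replace acts pointwise.
theorem go_single (o : Char) (new : List Char) :
    ∀ (cs : List Char) (fuel : Nat) (acc : List Char), cs.length ≤ fuel →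
      PySem.Chars.replace.go [o] new fuel cs acc
        = acc.reverse ++ cs.flatMap (fun c => if c = o then new else [c]) := by
  intro cs
  induction cs with
  | nil =>
    intro fuel acc _
    cases fuel <;> simp [PySem.Chars.replace.go]
  | cons c t ih =>
    intro fuel acc h
    cases fuel with
    | zero => simp at h
    | succ f =>
      have hf : t.length ≤ f := by simpa using h
      by_cases hc : c = o
      · subst hc
        simp [PySem.Chars.replace.go, List.isPrefixOf, ih f _ hf]
      · simp [PySem.Chars.replace.go, List.isPrefixOf, hc, Ne.symm hc, ih f _ hf]

theorem rep_single (cs : List Char) (o : Char) (new : List Char) :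
    PySem.Chars.replace cs [o] new
      = cs.flatMap (fun c => if c = o then new else [c]) := by
  simpa [PySem.Chars.replace] using go_single o new cs cs.length [] le_rfl

-- Folding the remove-replaces equals a single flatMap.
theorem foldE (L : List Char) :
    ∀ (cs : List Char),
      L.foldl (fun cs o => PySem.Chars.replace cs [o] []) cs
        = cs.flatMap (fun c => if c ∈ L then [] else [c]) := by
  induction L with
  | nil => intro cs; simp
  | cons o L ih =>
    intro cs
    have key : (fun c => (if c = o then ([] : List Char) else [c]).flatMap
                  (fun c => if c ∈ L then ([] : List Char) else [c]))
             = (fun c => if c ∈ o :: L then ([] : List Char) else [c]) := by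
      funext c
      by_cases hc : c = o <;> simp [hc]
    calc L.foldl (fun cs o => PySem.Chars.replace cs [o] []) (PySem.Chars.replace cs [o] [])
        = (PySem.Chars.replace cs [o] []).flatMap (fun c => if c ∈ L then [] else [c]) := ih _
      _ = cs.flatMap (fun c => if c ∈ o :: L then [] else [c]) := by
            rw [rep_single, List.flatMap_assoc, key]

-- Folding the underscore-replaces equals a single flatMap ('_' is a fixed point).
theorem foldU (L : List Char) :
    ∀ (cs : List Char),
      L.foldl (fun cs o => PySem.Chars.replace cs [o] ['_']) cs
        = cs.flatMap (fun c => if c ∈ L then ['_'] else [c]) := by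
  induction L with
  | nil => intro cs; simp
  | cons o L ih =>
    intro cs
    have key : (fun c => (if c = o then ['_'] else [c]).flatMap
                  (fun c => if c ∈ L then ['_'] else [c]))
             = (fun c => if c ∈ o :: L then ['_'] else [c]) := by
      funext c
      by_cases hc : c = o <;> simp [hc, ite_self]
    calc L.foldl (fun cs o => PySem.Chars.replace cs [o] ['_']) (PySem.Chars.replace cs [o] ['_'])
        = (PySem.Chars.replace cs [o] ['_']).flatMap (fun c => if c ∈ L then ['_'] else [c]) := ih _
      _ = cs.flatMap (fun c => if c ∈ o :: L then ['_'] else [c]) := by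
            rw [rep_single, List.flatMap_assoc, key]

-- From string-level folds to char-level folds.
theorem toList_fold_replace (e : String) :
    ∀ (L : List String) (s : String),
      (L.foldl (fun s ch => PySem.Str.replace s ch e) s).toList
        = L.foldl (fun cs ch => PySem.Chars.replace cs ch.toList e.toList) s.toList := by
  intro L
  induction L with
  | nil => intro s; rfl
  | cons a L ih =>
    intro s
    simp only [List.foldl_cons]
    rw [ih, PySem.Str.toList_replace]

-- "".join of pieces is flatten.
theorem flatten_intersperse_nil : ∀ (l : List (List Char)), (l.intersperse []).flatten = l.flatten := by
  intro l
  induction l with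
  | nil => rfl
  | cons a t ih =>
    cases t with
    | nil => rfl
    | cons b u => simpa [List.intersperse] using ih

theorem join_nil_flatten (l : List (List Char)) : PySem.Chars.join [] l = l.flatten := by
  simp [PySem.Chars.join, List.intercalate, flatten_intersperse_nil]

theorem replace_characters_for_url_spec : Claim_equal_replace_characters_for_url := by
  intro s _
  unfold Spec_replace_characters_for_url
  rw [← String.toList_inj]
  unfold replace_characters_for_url replace_characters_for_url_alt
  simp only []
  rw [toList_fold_replace, toList_fold_replace]
  have h1 : ([",", "(", ")", "'", ".", "!", "\"", "?", "[", "]", "{", "}",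
              "$", "#", "@", "%", "^", "*"] : List String).foldl
        (fun cs ch => PySem.Chars.replace cs ch.toList ("").toList) s.toList
      = removeChars.foldl (fun cs o => PySem.Chars.replace cs [o] []) s.toList := rfl
  have h2 : ∀ cs : List Char, ([" ", ":", "&", ";", "/", "+"] : List String).foldl
        (fun cs ch => PySem.Chars.replace cs ch.toList ("_").toList) cs
      = underscoreChars.foldl (fun cs o => PySem.Chars.replace cs [o] ['_']) cs :=
    fun cs => rfl
  rw [h1, h2, foldE, foldU, List.flatMap_assoc, join_nil_flatten,
      ← List.flatMap_def, String.toList_ofList]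
  refine List.flatMap_congr ?_
  intro c _
  by_cases h : c ∈ removeChars
  · simp [h]
  · by_cases h' : c ∈ underscoreChars <;> simp [h, h']
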